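-- pv_equiv track=rewrite | github.com/jmontp/LocoHub | contributor_tools/interactive_validation_tuner.py | _base_task_name
-- ===== SOURCE A (Python) =====
-- def _base_task_name(task_name: str) -> str:
--     """Strip population suffixes before registry lookup."""
--
--     if not task_name:
--         return ''
--
--     task_lower = task_name.lower()
--     population_suffixes = [
--         '_stroke', '_amputee', '_tfa', '_tta', '_pd', '_sci', '_cp',
--         '_ms', '_oa', '_cva', '_parkinsons'
--     ]
--     for suffix in population_suffixes:
--         if task_lower.endswith(suffix):
--             return task_lower[:-len(suffix)]
--     return task_lower
-- ===== SOURCE B (Python) =====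
-- _POPULATION_SUFFIXES = frozenset({
--     '_stroke', '_amputee', '_tfa', '_tta', '_pd', '_sci', '_cp',
--     '_ms', '_oa', '_cva', '_parkinsons'
-- })
--
--
-- def _base_task_name(task_name: str) -> str:
--     """Strip population suffixes before registry lookup."""
--
--     # One left-to-right pass: lowercase char by char while remembering the
--     # position of the last underscore seen; then a single set lookup decides
--     # whether the final token is a population suffix.
--     chars = []
--     last_us = -1
--     for i, ch in enumerate(task_name):
--         c = ch.lower()
--         chars.append(c)
--         if c == '_':
--             last_us = i
--     low = ''.join(chars)
--     if last_us >= 0 and low[last_us:] in _POPULATION_SUFFIXES: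
--         return low[:last_us]
--     return low
-- ===== Notes on version B (the rewrite author's own statement) =====
-- stated objective: alternative
-- what changed: B replaces A's eleven-suffix endswith scan with a single left-to-right pass that lowercases character by character while tracking the index of the last underscore, then decides with one set lookup of the final token; correct because every population suffix is a single underscore-delimited token.
import Mathlib
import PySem

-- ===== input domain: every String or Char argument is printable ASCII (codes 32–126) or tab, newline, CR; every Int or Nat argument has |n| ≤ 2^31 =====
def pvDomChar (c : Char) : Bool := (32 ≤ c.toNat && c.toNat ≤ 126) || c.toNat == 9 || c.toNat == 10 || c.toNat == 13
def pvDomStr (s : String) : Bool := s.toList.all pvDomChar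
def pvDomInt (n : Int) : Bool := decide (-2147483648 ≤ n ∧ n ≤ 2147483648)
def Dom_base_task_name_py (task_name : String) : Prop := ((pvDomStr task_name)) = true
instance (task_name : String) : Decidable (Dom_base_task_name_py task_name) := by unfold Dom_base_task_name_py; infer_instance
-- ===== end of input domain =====

-- B replaces A's eleven-suffix endswith scan by ONE left-to-right pass that lowercases char by
-- char while remembering the position of the last underscore, followed by a single set lookup
-- of the final token (objective: alternative). Return values agree on all inputs.

-- ===== PORT A =====
def pvSuffixesA : List (List Char) :=
  [['_', 's', 't', 'r', 'o', 'k', 'e'], ['_', 'a', 'm', 'p', 'u', 't', 'e', 'e'], ['_', 't', 'f', 'a'], ['_', 't', 't', 'a'], ['_', 'p', 'd'],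
   ['_', 's', 'c', 'i'], ['_', 'c', 'p'], ['_', 'm', 's'], ['_', 'o', 'a'], ['_', 'c', 'v', 'a'],
   ['_', 'p', 'a', 'r', 'k', 'i', 'n', 's', 'o', 'n', 's']]

-- the 'for suffix in population_suffixes' loop of A, with its early return
def pvScanA (low : List Char) : List (List Char) → List Char
  | [] => low
  | suf :: rest =>
    if PySem.Chars.endswith low suf then
      PySem.List.slice low none (some (-(suf.length : Int)))   -- task_lower[:-len(suffix)]
    else pvScanA low rest

def base_task_name_py (task_name : String) : String :=
  if task_name.toList = [] then ""
  else String.ofList (pvScanA (PySem.Chars.lower task_name.toList) pvSuffixesA)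

-- ===== PORT B =====
-- frozenset of the population suffixes, as strings
def pvPopulationSuffixes : PySem.Set String :=
  PySem.Set.ofList
    ["_stroke", "_amputee", "_tfa", "_tta", "_pd", "_sci", "_cp",
     "_ms", "_oa", "_cva", "_parkinsons"]

-- body of Source B's 'for i, ch in enumerate(task_name)' loop:
-- state = (chars so far, last_us, i); appends ch.lower(), records i when it is '_'
def pvStepB (st : List Char × Int × Nat) (ch : Char) : List Char × Int × Nat :=
  let c := PySem.Chars.lowerChar ch
  (st.1 ++ [c], (if c = '_' then (st.2.2 : Int) else st.2.1), st.2.2 + 1)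

def base_task_name_py_alt (task_name : String) : String :=
  let st := task_name.toList.foldl pvStepB ([], -1, 0)
  let low := st.1
  let last_us := st.2.1
  if 0 ≤ last_us ∧ pvPopulationSuffixes.contains (String.ofList (PySem.List.slice low (some last_us) none)) = true then
    String.ofList (PySem.List.slice low none (some last_us))   -- low[:last_us]
  else String.ofList low

-- ===== PRECONDITION & SPEC =====
def Spec_base_task_name_py (task_name : String) (out : String) : Prop := out = base_task_name_py_alt task_name
instance (task_name : String) (out : String) : Decidable (Spec_base_task_name_py task_name out) := by unfold Spec_base_task_name_py; infer_instance

-- ===== CLAIM (what is proved, stated in full; the proofs are below) =====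
def Claim_equal_base_task_name_py : Prop := ∀ (task_name : String), Dom_base_task_name_py task_name → Spec_base_task_name_py task_name (base_task_name_py task_name)

-- ===== LEMMAS AND PROOFS =====

-- the final token of l (after the last underscore), reversed
def pvTok (l : List Char) : List Char := l.reverse.takeWhile (fun c => c != '_')

-- index of the last underscore of l, -1 if none
def pvLastUS (l : List Char) : Int :=
  if '_' ∈ l then ((l.length : Int) - (pvTok l).length - 1) else -1

-- slicing with a negative stop -k takes all but the last k characters
theorem pv_slice_neg_to (xs : List Char) (k : Nat) (h0 : 0 < k) (hk : k ≤ xs.length) :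
    PySem.List.slice xs none (some (-(k : Int))) = xs.take (xs.length - k) := by
  simp only [PySem.List.slice, PySem.List.clampIdx]
  rw [if_pos (by omega), if_neg (by omega)]
  simp
  omega

-- slicing with a nonnegative start k in range drops the first k characters
theorem pv_slice_nonneg_from (xs : List Char) (k : Nat) (hk : k ≤ xs.length) :
    PySem.List.slice xs (some (k : Int)) none = xs.drop k := by
  have h0 : ¬ ((k : Int) < 0) := by omega
  simp [PySem.List.slice, PySem.List.clampIdx, h0, min_eq_left hk]

-- slicing with a nonnegative stop k in range takes the first k characters
theorem pv_slice_nonneg_to (xs : List Char) (k : Nat) (hk : k ≤ xs.length) :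
    PySem.List.slice xs none (some (k : Int)) = xs.take k := by
  have h0 : ¬ ((k : Int) < 0) := by omega
  simp [PySem.List.slice, PySem.List.clampIdx, h0, min_eq_left hk]

-- a name ends with '_'::u (u underscore-free) iff the final token after the LAST underscore is u
theorem pv_ends_char (cs u : List Char) (hu : ∀ a ∈ u, (a != '_') = true) :
    PySem.Chars.endswith cs ('_' :: u) = true ↔
      (cs.reverse.takeWhile (fun c => c != '_') = u.reverse ∧ u.length < cs.length) := by
  rw [PySem.Chars.endswith_iff]
  constructor
  · rintro ⟨pre, rfl⟩
    have hr : (pre ++ '_' :: u).reverse = u.reverse ++ '_' :: pre.reverse := by simp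
    rw [hr]
    refine ⟨?_, by simp; omega⟩
    rw [List.takeWhile_append_of_pos (by simpa using fun a ha => hu a ha)]
    simp
  · rintro ⟨ht, hl⟩
    have hsplit := List.takeWhile_append_dropWhile (p := fun c => c != '_') (l := cs.reverse)
    have hdne : cs.reverse.dropWhile (fun c => c != '_') ≠ [] := by
      intro h
      have := congrArg List.length hsplit
      rw [ht, h] at this
      simp at this
      omega
    obtain ⟨c, d', hcd⟩ := List.exists_cons_of_ne_nil hdne
    have hh : c = '_' := by
      have h2 := List.head_dropWhile_not (fun c => c != '_') hdne
      have h3 : (List.dropWhile (fun c => c != '_') cs.reverse).head hdne = c := by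
        simp [hcd]
      rw [h3] at h2
      simpa using h2
    refine ⟨d'.reverse, ?_⟩
    have hcs : cs = (cs.reverse).reverse := by simp
    rw [hcs, ← hsplit, ht, hcd, hh]
    simp

-- A's scan over any list of single-token suffixes equals the last-token characterization
theorem pv_scan_eq (cs : List Char) (L : List (List Char))
    (hL : ∀ suf ∈ L, suf.head? = some '_' ∧ ∀ a ∈ suf.tail, (a != '_') = true) :
    pvScanA cs L =
      (if (pvTok cs).length < cs.length ∧
          ('_' :: (pvTok cs).reverse) ∈ L then
        cs.take (cs.length - (pvTok cs).length - 1)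
      else cs) := by
  induction L with
  | nil => simp [pvScanA]
  | cons suf rest ih =>
    obtain ⟨hh, hu0⟩ := hL _ (List.mem_cons_self ..)
    have hrest : ∀ s ∈ rest, s.head? = some '_' ∧ ∀ a ∈ s.tail, (a != '_') = true :=
      fun s hs => hL s (List.mem_cons_of_mem _ hs)
    obtain ⟨c, u, rfl⟩ : ∃ c u, suf = c :: u := by
      cases suf with
      | nil => simp at hh
      | cons c u => exact ⟨c, u, rfl⟩
    obtain rfl : c = '_' := by simpa using hh
    have hu : ∀ a ∈ u, (a != '_') = true := by simpa using hu0
    by_cases he : PySem.Chars.endswith cs ('_' :: u) = true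
    · obtain ⟨ht, hl⟩ := (pv_ends_char cs u hu).mp he
      have hlen : (pvTok cs).length = u.length := by
        rw [pvTok, ht]; simp
      rw [pvScanA, if_pos he, if_pos ?_]
      · simp only [List.length_cons]
        rw [show (-((u.length + 1 : Nat) : Int)) = -((u.length + 1 : Nat) : Int) from rfl,
            pv_slice_neg_to cs (u.length + 1) (by omega) (by omega)]
        congr 1
        omega
      · exact ⟨by omega, by rw [pvTok, ht]; simp⟩
    · rw [pvScanA, if_neg he, ih hrest]
      have hne : ¬ (((pvTok cs).length < cs.length) ∧
          ('_' :: (pvTok cs).reverse) = '_' :: u) := by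
        rintro ⟨hlt, heq⟩
        apply he
        rw [pv_ends_char cs u hu]
        have h4 : (pvTok cs).reverse = u := by simpa using heq
        have htr : cs.reverse.takeWhile (fun c => c != '_') = u.reverse := by
          rw [show cs.reverse.takeWhile (fun c => c != '_') = pvTok cs from rfl, ← h4]; simp
        refine ⟨htr, ?_⟩
        have h5 : (cs.reverse.takeWhile (fun c => c != '_')).length = u.length := by
          rw [htr]; simp
        rw [pvTok] at hlt
        omega
      refine (if_congr ?_ rfl rfl).symm
      simp only [List.mem_cons]
      constructor
      · rintro ⟨h1, h2 | h2⟩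
        · exact absurd ⟨h1, h2⟩ hne
        · exact ⟨h1, h2⟩
      · rintro ⟨h1, h2⟩
        exact ⟨h1, Or.inr h2⟩

-- String.ofList is injective onto toList
theorem pv_ofList_eq (x : List Char) (s : String) : (String.ofList x = s) ↔ x = s.toList := by
  constructor
  · intro h; rw [← h]; simp
  · intro h; subst h; simp

-- membership of '_'::token in B's string set coincides with A's char-list suffix list
theorem pv_set_iff (x : List Char) :
    pvPopulationSuffixes.contains (String.ofList x) = true ↔ x ∈ pvSuffixesA := by
  simp only [pvPopulationSuffixes, PySem.Set.contains, PySem.Set.ofList, pvSuffixesA,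
    List.mem_cons, List.not_mem_nil, or_false]
  simp [pv_ofList_eq]

-- '_' occurs in l iff the final token is a proper suffix
theorem pv_mem_iff (l : List Char) : '_' ∈ l ↔ (pvTok l).length < l.length := by
  constructor
  · intro h
    have hsplit := List.takeWhile_append_dropWhile (p := fun c => c != '_') (l := l.reverse)
    have hdne : l.reverse.dropWhile (fun c => c != '_') ≠ [] := by
      intro hnil
      rw [hnil, List.append_nil] at hsplit
      have hall : ∀ a ∈ l.reverse, (a != '_') = true := by
        intro a ha
        rw [← hsplit] at ha
        exact List.mem_takeWhile_imp (p := fun c => c != '_') ha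
      have := hall '_' (List.mem_reverse.mpr h)
      simp at this
  -- lengths
    have hlen := congrArg List.length hsplit
    simp only [List.length_append, List.length_reverse] at hlen
    have : 0 < (l.reverse.dropWhile (fun c => c != '_')).length := List.length_pos_iff.mpr hdne
    rw [pvTok]
    omega
  · intro h
    by_contra hmem
    have : l.reverse.takeWhile (fun c => c != '_') = l.reverse := by
      rw [List.takeWhile_eq_self_iff]
      intro a ha
      have : a ≠ '_' := fun e => hmem (List.mem_reverse.mp (e ▸ ha))
      simpa using this
    rw [pvTok, this] at h
    simp at h

-- dropping up to the last underscore leaves '_' followed by the final token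
theorem pv_drop_last (l : List Char) (h : '_' ∈ l) :
    l.drop (l.length - (pvTok l).length - 1) = '_' :: (pvTok l).reverse := by
  have hsplit := List.takeWhile_append_dropWhile (p := fun c => c != '_') (l := l.reverse)
  have hdne : l.reverse.dropWhile (fun c => c != '_') ≠ [] := by
    intro hnil
    rw [hnil, List.append_nil] at hsplit
    have := List.mem_takeWhile_imp (p := fun c => c != '_')
      (hsplit ▸ (List.mem_reverse.mpr h))
    simp at this
  obtain ⟨c, d', hcd⟩ := List.exists_cons_of_ne_nil hdne
  have hc : c = '_' := by
    have h2 := List.head_dropWhile_not (fun c => c != '_') hdne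
    have h3 : (List.dropWhile (fun c => c != '_') l.reverse).head hdne = c := by simp [hcd]
    rw [h3] at h2
    simpa using h2
  subst hc
  have hrev : l.reverse = pvTok l ++ '_' :: d' := by
    rw [pvTok, ← hcd]; exact hsplit.symm
  have hl2 : l = d'.reverse ++ '_' :: (pvTok l).reverse := by
    have := congrArg List.reverse hrev
    simpa using this
  have hlen : l.length = d'.length + (pvTok l).length + 1 := by
    have := congrArg List.length hl2
    simp at this
    omega
  have hidx : l.length - (pvTok l).length - 1 = d'.length := by omega
  rw [hidx]
  conv_lhs => rw [hl2]
  rw [show d'.length = d'.reverse.length by simp, List.drop_left]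

-- the fold of B computes (lowered string, index of its last underscore, length)
theorem pv_fold (cs : List Char) :
    cs.foldl pvStepB ([], -1, 0) =
      (PySem.Chars.lower cs, pvLastUS (PySem.Chars.lower cs), cs.length) := by
  induction cs using List.reverseRecOn with
  | nil => simp [pvLastUS, PySem.Chars.lower]
  | append_singleton l x ih =>
    rw [List.foldl_append, ih]
    have hmap : PySem.Chars.lower (l ++ [x]) =
        PySem.Chars.lower l ++ [PySem.Chars.lowerChar x] := by
      simp [PySem.Chars.lower]
    set m := PySem.Chars.lower l with hm
    have hml : m.length = l.length := by simp [hm, PySem.Chars.lower]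
    simp only [List.foldl_cons, List.foldl_nil, pvStepB, hmap]
    by_cases hc : PySem.Chars.lowerChar x = '_'
    · rw [if_pos hc, hc]
      have htok : pvTok (m ++ ['_']) = [] := by simp [pvTok]
      have : pvLastUS (m ++ ['_']) = (l.length : Int) := by
        rw [pvLastUS, if_pos (by simp), htok]
        simp [hml]
      simp [this]
    · rw [if_neg hc]
      have htok : pvTok (m ++ [PySem.Chars.lowerChar x]) =
          PySem.Chars.lowerChar x :: pvTok m := by
        simp only [pvTok, List.reverse_append, List.reverse_singleton, List.singleton_append]
        rw [List.takeWhile_cons_of_pos (by simpa using hc)]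
      have hmem : '_' ∈ m ++ [PySem.Chars.lowerChar x] ↔ '_' ∈ m := by
        simp
        intro h; exact absurd h.symm hc
      have : pvLastUS (m ++ [PySem.Chars.lowerChar x]) = pvLastUS m := by
        by_cases hin : '_' ∈ m
        · rw [pvLastUS, pvLastUS, if_pos (hmem.mpr hin), if_pos hin, htok]
          simp only [List.length_append, List.length_cons, List.length_nil]
          omega
        · rw [pvLastUS, pvLastUS, if_neg (fun h => hin (hmem.mp h)), if_neg hin]
      simp [this]

-- ===== VERDICT (by name: the statement is the Claim_ definition above) =====
set_option maxRecDepth 8192 in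
theorem base_task_name_py_spec : Claim_equal_base_task_name_py := by
  intro task_name _
  unfold Spec_base_task_name_py base_task_name_py base_task_name_py_alt
  simp only [pv_fold]
  by_cases hnil : task_name.toList = []
  · rw [if_pos hnil, hnil]
    have hm : PySem.Chars.lower ([] : List Char) = [] := rfl
    rw [hm]
    have : pvLastUS [] = -1 := by rw [pvLastUS]; simp
    rw [this, if_neg (by intro h; exact absurd h.1 (by norm_num))]
  · rw [if_neg hnil]
    have hL : ∀ suf ∈ pvSuffixesA, suf.head? = some '_' ∧ ∀ a ∈ suf.tail, (a != '_') = true := by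
      intro suf hsuf; fin_cases hsuf <;> exact ⟨rfl, by simp⟩
    rw [pv_scan_eq _ pvSuffixesA hL]
    by_cases hin : '_' ∈ PySem.Chars.lower task_name.toList
    · have hlt := (pv_mem_iff _).mp hin
      have hk : pvLastUS (PySem.Chars.lower task_name.toList) =
          (((PySem.Chars.lower task_name.toList).length - (pvTok (PySem.Chars.lower task_name.toList)).length - 1 : Nat) : Int) := by
        rw [pvLastUS, if_pos hin]; omega
      rw [hk, pv_slice_nonneg_from _ _ (by omega), pv_slice_nonneg_to _ _ (by omega),
          pv_drop_last _ hin]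
      by_cases hmem : ('_' :: (pvTok (PySem.Chars.lower task_name.toList)).reverse) ∈ pvSuffixesA
      · rw [if_pos ⟨hlt, hmem⟩,
            if_pos ⟨by omega, (pv_set_iff _).mpr hmem⟩]
      · rw [if_neg (by rintro ⟨_, h2⟩; exact hmem h2),
            if_neg (by rintro ⟨_, h2⟩; exact hmem ((pv_set_iff _).mp h2))]
    · have hlast : pvLastUS (PySem.Chars.lower task_name.toList) = -1 := by
        rw [pvLastUS, if_neg hin]
      rw [hlast,
          if_neg (by rintro ⟨h1, _⟩; exact hin ((pv_mem_iff _).mpr h1)),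
          if_neg (by rintro ⟨h1, _⟩; exact absurd h1 (by norm_num))]
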